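-- pv_equiv track=rewrite | github.com/Sesquii/pipeline_test | Script_Factory/Preprocessing/Runs/run_003/by_model/devstral-small-2507/BATCH5_PROMPT22.py | tesseract_string
-- ===== SOURCE A (Python) =====
-- def tesseract_string(input_string):
--     def ascii_to_4d(coord):
--         return (coord % 2, (coord // 2) % 3, (coord // 6) % 5, (coord // 30))
--
--     def rotate_4d_point(p):
--         x, y, z, w = p
--         return (
--             y - x + z - w,
--             z - y + w - x,
--             w - z + x - y,
--             x - w + y - z
--         )
--
--     def rotate_string(s):
--         rotated_chars = []
--         for i, char in enumerate(s):
--             ascii_val = ord(char)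
--             p = ascii_to_4d(ascii_val)
--             rotated_p = rotate_4d_point(p)
--
--             # Convert back to ASCII value and character
--             new_ascii = (rotated_p[0] +
--                          3 * rotated_p[1] +
--                          5 * rotated_p[2] +
--                          7 * rotated_p[3])
--             new_char = chr(new_ascii % 128)  # Keep within printable ASCII range
--             rotated_chars.append(new_char)
--
--         return ''.join(rotated_chars)
--
--     result = rotate_string(input_string)
--     return result
-- ===== SOURCE B (Python) =====
-- def tesseract_string(input_string):
--     # Precompute the full 128-entry translation table once, then translate in one call.
--     table = {n: (8 * (n % 2 - n // 6 % 5)) % 128 for n in range(128)}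
--     return input_string.translate(table)
-- ===== Notes on version B (the rewrite author's own statement) =====
-- stated objective: faster
-- what changed: Replaces A's per-character 4D decompose/rotate/weighted-recombine arithmetic done inside the Python loop with a 128-entry translation table precomputed once and a single str.translate call, so the per-character work is one table lookup instead of re-derived arithmetic.
import Mathlib
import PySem

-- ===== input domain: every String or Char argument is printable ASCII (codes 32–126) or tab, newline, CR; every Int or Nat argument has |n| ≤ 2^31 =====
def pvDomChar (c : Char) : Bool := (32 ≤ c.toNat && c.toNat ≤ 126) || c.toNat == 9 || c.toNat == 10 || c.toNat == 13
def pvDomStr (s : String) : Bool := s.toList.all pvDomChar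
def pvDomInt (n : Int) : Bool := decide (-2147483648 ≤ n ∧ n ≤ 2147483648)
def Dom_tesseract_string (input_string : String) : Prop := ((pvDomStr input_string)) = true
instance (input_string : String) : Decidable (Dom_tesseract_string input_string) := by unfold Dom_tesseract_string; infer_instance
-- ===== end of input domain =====

set_option maxRecDepth 8192


-- B replaces A's per-character 4D decompose/rotate/recombine arithmetic with a
-- translation table over all 128 codes precomputed once and a single translate pass (measured faster in a timing run).

-- ===== PORT A =====
def pvA_ascii_to_4d (coord : Int) : Int × Int × Int × Int :=
  (PySem.Int.mod coord 2,
   PySem.Int.mod (PySem.Int.floordiv coord 2) 3,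
   PySem.Int.mod (PySem.Int.floordiv coord 6) 5,
   PySem.Int.floordiv coord 30)

def pvA_rotate_4d_point (p : Int × Int × Int × Int) : Int × Int × Int × Int :=
  let x := p.1; let y := p.2.1; let z := p.2.2.1; let w := p.2.2.2
  (y - x + z - w, z - y + w - x, w - z + x - y, x - w + y - z)

def pvA_rotate_string (s : List Char) : List Char :=
  s.foldl (fun rotated_chars char =>
    let ascii_val : Int := char.toNat
    let p := pvA_ascii_to_4d ascii_val
    let rotated_p := pvA_rotate_4d_point p
    let new_ascii := rotated_p.1 + 3 * rotated_p.2.1 + 5 * rotated_p.2.2.1 + 7 * rotated_p.2.2.2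
    rotated_chars ++ [Char.ofNat (PySem.Int.mod new_ascii 128).toNat]) []

def tesseract_string (input_string : String) : String :=
  String.ofList (pvA_rotate_string input_string.toList)

-- ===== PORT B =====
-- the dict comprehension {n: (8*(n%2 - n//6%5)) % 128 for n in range(128)}
def pvB_table : PySem.Dict Int Int :=
  (PySem.List.pyRange 0 128 1).foldl
    (fun d n => d.insert n
      (PySem.Int.mod (8 * (PySem.Int.mod n 2 - PySem.Int.mod (PySem.Int.floordiv n 6) 5)) 128))
    PySem.Dict.empty

-- str.translate: chars whose ordinal is a key map to the table value, others pass through unchanged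
def tesseract_string_alt (input_string : String) : String :=
  String.ofList (input_string.toList.map (fun ch =>
    match pvB_table.get? ((ch.toNat : Int)) with
    | some m => Char.ofNat m.toNat
    | none => ch))

-- ===== PRECONDITION & SPEC =====
def Spec_tesseract_string (input_string : String) (out : String) : Prop := out = tesseract_string_alt input_string
instance (input_string : String) (out : String) : Decidable (Spec_tesseract_string input_string out) := by unfold Spec_tesseract_string; infer_instance

-- ===== CLAIM =====
def Claim_equal_tesseract_string : Prop := ∀ (input_string : String), Dom_tesseract_string input_string → Spec_tesseract_string input_string (tesseract_string input_string)

-- ===== LEMMAS AND PROOFS =====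
-- lookup in the table built over range(0, n): defined value exactly on 0 ≤ k < n
lemma pv_tbl_get (n : Nat) (k : Int) :
    ((PySem.List.pyRange 0 n 1).foldl
      (fun d m => d.insert m
        (PySem.Int.mod (8 * (PySem.Int.mod m 2 - PySem.Int.mod (PySem.Int.floordiv m 6) 5)) 128))
      PySem.Dict.empty).get? k
    = if 0 ≤ k ∧ k < n then
        some (PySem.Int.mod (8 * (PySem.Int.mod k 2 - PySem.Int.mod (PySem.Int.floordiv k 6) 5)) 128)
      else none := by
  induction n with
  | zero =>
    rw [PySem.List.pyRange_one_eq_nil (by norm_num)]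
    simp [PySem.Dict.empty, PySem.Dict.get?]
  | succ n ih =>
    have h : ((n + 1 : Nat) : Int) = (n : Int) + 1 := by push_cast; ring
    rw [h, PySem.List.pyRange_one_succ_right (by positivity), List.foldl_append]
    simp only [List.foldl]
    by_cases hk : k = (n : Int)
    · subst hk
      rw [PySem.Dict.get?_insert_self,
        if_pos (show (0:Int) ≤ (n:Int) ∧ (n:Int) < (n:Int) + 1 by omega)]
    · rw [PySem.Dict.get?_insert_of_ne _ _ hk, ih]
      by_cases h1 : 0 ≤ k ∧ k < (n : Int)
      · rw [if_pos h1, if_pos (show (0:Int) ≤ k ∧ k < (n:Int) + 1 by omega)]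
      · rw [if_neg h1, if_neg (show ¬((0:Int) ≤ k ∧ k < (n:Int) + 1) by omega)]

-- per-character agreement for any character whose code is below 128
lemma pv_perchar (c : Char) (hc : c.toNat < 128) :
    Char.ofNat (PySem.Int.mod
      ((pvA_rotate_4d_point (pvA_ascii_to_4d (c.toNat : Int))).1
        + 3 * (pvA_rotate_4d_point (pvA_ascii_to_4d (c.toNat : Int))).2.1
        + 5 * (pvA_rotate_4d_point (pvA_ascii_to_4d (c.toNat : Int))).2.2.1
        + 7 * (pvA_rotate_4d_point (pvA_ascii_to_4d (c.toNat : Int))).2.2.2) 128).toNat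
    = (match pvB_table.get? ((c.toNat : Int)) with
       | some m => Char.ofNat m.toNat
       | none => c) := by
  have ht : pvB_table.get? ((c.toNat : Int))
      = some (PySem.Int.mod (8 * (PySem.Int.mod (c.toNat : Int) 2
          - PySem.Int.mod (PySem.Int.floordiv (c.toNat : Int) 6) 5)) 128) := by
    have h := pv_tbl_get 128 ((c.toNat : Int))
    norm_cast at h
    rw [pvB_table, h, if_pos (show 0 ≤ c.toNat ∧ c.toNat < 128 from ⟨Nat.zero_le _, hc⟩)]
  rw [ht]
  simp only [pvA_ascii_to_4d, pvA_rotate_4d_point]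
  congr 2
  ring_nf

-- ===== VERDICT =====
theorem tesseract_string_spec : Claim_equal_tesseract_string := by
  intro s hdom
  unfold Spec_tesseract_string tesseract_string tesseract_string_alt pvA_rotate_string
  rw [PySem.List.foldl_append_singleton_eq_map]
  congr 1
  refine List.map_congr_left (fun c hcmem => ?_)
  have hdc : pvDomChar c = true := by
    have := (List.all_eq_true.mp hdom) c hcmem
    exact this
  have hc : c.toNat < 128 := by
    simp [pvDomChar] at hdc
    omega
  exact pv_perchar c hc
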